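-- pv_equiv track=rewrite | github.com/bazhanka/Ylab_Bazhan | Stage 5.py | count_find_num
-- ===== SOURCE A (Python) =====
-- def count_find_num(primesL, limit):
--     res = []
--     first = 1
--     for i in primesL:
--         first = first*i
--     if first <= limit:
--         res.append(first)
--     else:
--         return []
--     ind = 0
--     rind = 0
--     while ind < len(primesL):
--         n = res[rind]*primesL[ind]
--         if n <= limit:
--             rind+=1
--             res.append(n)
--             res.sort()
--         else:
--             ind+=1
--             rind = 0
--             continue
--     return [len(res), max(res)]
-- ===== SOURCE B (Python) =====
-- def count_find_num(primesL, limit):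
--     P = 1
--     for p in primesL:
--         P *= p
--     if P > limit:
--         return []
--     vals = [P]
--     for p in primesL:
--         nxt = []
--         for v in vals:
--             while v <= limit:
--                 nxt.append(v)
--                 v *= p
--         vals = nxt
--     return [len(vals), max(vals)]
-- ===== Notes on version B (the rewrite author's own statement) =====
-- stated objective: alternative
-- what changed: Replaces A's single worklist with index pointers and a full sort after every append by per-prime regeneration of the value list from geometric chains (for each value, keep multiplying by the prime while <= limit), removing all sorting; count and max are read off the final list.
-- outside the precondition, e.g. on count_find_num([-2], -2): A returns [1, -2], B returns [1, -2]
import Mathlib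
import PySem

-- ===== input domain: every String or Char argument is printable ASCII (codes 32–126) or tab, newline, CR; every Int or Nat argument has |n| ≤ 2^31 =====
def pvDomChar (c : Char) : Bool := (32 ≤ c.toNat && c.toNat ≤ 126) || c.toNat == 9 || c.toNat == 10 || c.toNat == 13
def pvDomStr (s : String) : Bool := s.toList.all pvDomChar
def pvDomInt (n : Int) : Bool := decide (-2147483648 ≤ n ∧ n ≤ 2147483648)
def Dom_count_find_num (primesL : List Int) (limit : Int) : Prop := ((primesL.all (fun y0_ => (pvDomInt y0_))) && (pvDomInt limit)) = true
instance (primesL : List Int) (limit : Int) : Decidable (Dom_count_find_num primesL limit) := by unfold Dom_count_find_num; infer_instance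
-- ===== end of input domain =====

-- B removes A's per-append sort and index juggling: each prime regenerates the value list from geometric chains (a different, sort-free algorithm); equivalence proved on prime lists with all entries >= 2 (or product already over the limit).


-- ===== PORT A =====
-- the while loop, fueled (A diverges outside Pre_; the fuel in count_find_num is proved sufficient there)
def pvLoopA (primesL : List Int) (limit : Int) : Nat → List Int → Nat → Nat → List Int
  | 0, res, _, _ => res
  | fuel+1, res, ind, rind =>
    if ind < primesL.length then
      let n := res.getD rind 0 * primesL.getD ind 0    -- res[rind], primesL[ind]: always in range (rind < len res invariant)
      if n ≤ limit then
        pvLoopA primesL limit fuel (PySem.List.sorted (res ++ [n]) (fun x => x) false) ind (rind+1)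
      else
        pvLoopA primesL limit fuel res (ind+1) 0
    else res

def count_find_num (primesL : List Int) (limit : Int) : List Int :=
  let first := primesL.foldl (fun a i => a * i) 1
  if first ≤ limit then
    let res := pvLoopA primesL limit ((limit.toNat + 1) ^ primesL.length + primesL.length + 1) [first] 0 0
    [PySem.List.len res, (PySem.List.max? res (fun x => x)).getD 0]   -- max(res): res is nonempty, getD 0 is a totalization guard only
  else []

-- ===== PORT B =====
-- the inner while of Source B: v, v*p, v*p*p, ... while <= limit (fueled; limit.toNat+1 is enough on Pre_)
def pvChain (p limit : Int) : Nat → Int → List Int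
  | 0, _ => []
  | fuel+1, v => if v ≤ limit then v :: pvChain p limit fuel (v * p) else []

-- the 'for v in vals: while ...' generation of nxt
def pvClos (limit p : Int) (vals : List Int) : List Int :=
  vals.flatMap (fun v => pvChain p limit (limit.toNat + 1) v)

def count_find_num_alt (primesL : List Int) (limit : Int) : List Int :=
  let P := primesL.foldl (fun a p => a * p) 1
  if P > limit then []
  else
    let vals := primesL.foldl (fun vals p => pvClos limit p vals) [P]
    [PySem.List.len vals, (PySem.List.max? vals (fun x => x)).getD 0]

-- ===== PRECONDITION & SPEC =====
-- Pre_ excludes inputs that have an entry ≤ 1 while the product of all entries is ≤ limit: on those A's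
-- while loop almost always runs forever (entries 0, 1 or negative are outside the prime-list purpose of
-- the function); on the rare such inputs where A does return, e.g. ([-2], -2), B happens to agree, but no
-- equivalence is claimed there.
def Pre_count_find_num (primesL : List Int) (limit : Int) : Prop :=
  (∀ p ∈ primesL, 2 ≤ p) ∨ limit < primesL.foldl (fun a i => a * i) 1
instance (primesL : List Int) (limit : Int) : Decidable (Pre_count_find_num primesL limit) := by
  unfold Pre_count_find_num; infer_instance
def pvWitness_count_find_num : List Int × Int := ([2, 3], 100)

def Spec_count_find_num (primesL : List Int) (limit : Int) (out : List Int) : Prop := out = count_find_num_alt primesL limit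
instance (primesL : List Int) (limit : Int) (out : List Int) : Decidable (Spec_count_find_num primesL limit out) := by unfold Spec_count_find_num; infer_instance

-- ===== CLAIM (what is proved, stated in full; the proofs are below) =====
def Claim_equal_count_find_num : Prop := ∀ (primesL : List Int) (limit : Int), Dom_count_find_num primesL limit → Pre_count_find_num primesL limit → Spec_count_find_num primesL limit (count_find_num primesL limit)

-- ===== LEMMAS AND PROOFS =====

-- what A's loop will have produced, as a multiset, from state (res, ind, rind)
def pvT (primesL : List Int) (limit : Int) (res : List Int) (ind rind : Nat) : List Int :=
  match primesL.drop ind with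
  | [] => res
  | p :: ps => ps.foldl (fun a q => pvClos limit q a) (res.take rind ++ pvClos limit p (res.drop rind))

theorem pvChain_of_gt {p limit v : Int} (h : limit < v) : ∀ f, pvChain p limit f v = [] := by
  intro f; cases f <;> simp [pvChain, not_le.mpr h]

theorem pvChain_mem {p limit : Int} (hp : 2 ≤ p) :
    ∀ (f : Nat) (v : Int), 1 ≤ v → ∀ x ∈ pvChain p limit f v, 1 ≤ x ∧ x ≤ limit := by
  intro f
  induction f with
  | zero => intro v hv x hx; simp [pvChain] at hx
  | succ f ih =>
    intro v hv x hx
    simp only [pvChain] at hx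
    split at hx
    · rcases List.mem_cons.mp hx with h | h
      · subst h; exact ⟨hv, by omega⟩
      · exact ih (v * p) (by nlinarith) x h
    · simp at hx

theorem pvChain_length_le (p limit : Int) : ∀ (f : Nat) (v : Int), (pvChain p limit f v).length ≤ f := by
  intro f
  induction f with
  | zero => intro v; simp [pvChain]
  | succ f ih =>
    intro v
    simp only [pvChain]
    split
    · simpa using Nat.succ_le_succ (ih (v * p))
    · simp

theorem pvChain_fuel {p limit : Int} (hp : 2 ≤ p) :
    ∀ (f : Nat) (v : Int) (g : Nat), 1 ≤ v → (limit - v).toNat < f → (limit - v).toNat < g →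
      pvChain p limit f v = pvChain p limit g v := by
  intro f
  induction f with
  | zero => intro v g hv h1 h2; omega
  | succ f ih =>
    intro v g hv h1 h2
    match g, h2 with
    | g+1, h2 =>
      simp only [pvChain]
      split
      · rename_i hle
        congr 1
        by_cases hvpl : v * p ≤ limit
        · have hvp : v + 1 ≤ v * p := by nlinarith
          exact ih (v * p) g (by nlinarith) (by omega) (by omega)
        · rw [pvChain_of_gt (by omega), pvChain_of_gt (by omega)]
      · rfl

theorem pvChain_canon_cons {p limit v : Int} (hp : 2 ≤ p) (hv : 1 ≤ v) (hle : v ≤ limit) :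
    pvChain p limit (limit.toNat + 1) v = v :: pvChain p limit (limit.toNat + 1) (v * p) := by
  have h1 : limit.toNat + 1 = (limit.toNat) + 1 := rfl
  simp only [pvChain, if_pos hle]
  congr 1
  have hvp : v + 1 ≤ v * p := by nlinarith
  have hlim : 1 ≤ limit := le_trans hv hle
  exact pvChain_fuel hp limit.toNat (v * p) (limit.toNat + 1) (by omega) (by omega) (by omega)

theorem pvChain_canon_single {p limit v : Int} (hle : v ≤ limit) (hgt : limit < v * p) :
    pvChain p limit (limit.toNat + 1) v = [v] := by
  simp only [pvChain, if_pos hle]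
  cases h : limit.toNat with
  | zero => rfl
  | succ k => simp [pvChain, not_le.mpr hgt]

theorem pvClos_mem {limit p : Int} (hp : 2 ≤ p) {vals : List Int}
    (h : ∀ x ∈ vals, 1 ≤ x ∧ x ≤ limit) : ∀ x ∈ pvClos limit p vals, 1 ≤ x ∧ x ≤ limit := by
  intro x hx
  simp only [pvClos, List.mem_flatMap] at hx
  obtain ⟨v, hv, hxv⟩ := hx
  exact pvChain_mem hp _ v (h v hv).1 x hxv

theorem pvClos_length_le (limit p : Int) (vals : List Int) :
    (pvClos limit p vals).length ≤ vals.length * (limit.toNat + 1) := by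
  induction vals with
  | nil => simp [pvClos]
  | cons v t ih =>
    simp only [pvClos, List.flatMap_cons, List.length_append] at *
    have := pvChain_length_le p limit (limit.toNat + 1) v
    calc (pvChain p limit (limit.toNat + 1) v).length + (t.flatMap (fun v => pvChain p limit (limit.toNat + 1) v)).length
        ≤ (limit.toNat + 1) + t.length * (limit.toNat + 1) := by omega
      _ = (t.length + 1) * (limit.toNat + 1) := by ring

theorem pvClos_length_ge {limit p : Int} (_hp : 2 ≤ p) (vals : List Int)
    (h : ∀ x ∈ vals, 1 ≤ x ∧ x ≤ limit) : vals.length ≤ (pvClos limit p vals).length := by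
  induction vals with
  | nil => simp [pvClos]
  | cons v t ih =>
    simp only [pvClos, List.flatMap_cons, List.length_append, List.length_cons] at *
    have h1 := h v (by simp)
    have hne : pvChain p limit (limit.toNat + 1) v = v :: pvChain p limit limit.toNat (v * p) := by
      simp [pvChain, if_pos h1.2]
    have := ih (fun x hx => h x (by simp [hx]))
    rw [hne]
    simp only [List.length_cons]
    omega

theorem pvClos_perm (limit p : Int) {xs ys : List Int} (h : xs.Perm ys) :
    (pvClos limit p xs).Perm (pvClos limit p ys) := by
  exact List.Perm.flatMap_right _ h

theorem pvClos_eq_self {limit p : Int} (_hp : 2 ≤ p) {vals : List Int}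
    (h : ∀ x ∈ vals, 1 ≤ x ∧ x ≤ limit ∧ limit < x * p) : pvClos limit p vals = vals := by
  induction vals with
  | nil => simp [pvClos]
  | cons v t ih =>
    have h1 := h v (by simp)
    simp only [pvClos, List.flatMap_cons] at *
    rw [pvChain_canon_single h1.2.1 h1.2.2, ih (fun x hx => h x (by simp [hx]))]
    rfl

-- foldl of pvClos: membership, length bounds, perm congruence
theorem pvFold_length_le {limit : Int} : ∀ (ps : List Int) (xs : List Int),
    (ps.foldl (fun a q => pvClos limit q a) xs).length ≤ xs.length * (limit.toNat + 1) ^ ps.length := by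
  intro ps
  induction ps with
  | nil => simp
  | cons p t ih =>
    intro xs
    simp only [List.foldl_cons, List.length_cons, pow_succ]
    calc (t.foldl (fun a q => pvClos limit q a) (pvClos limit p xs)).length
        ≤ (pvClos limit p xs).length * (limit.toNat + 1) ^ t.length := ih _
      _ ≤ (xs.length * (limit.toNat + 1)) * (limit.toNat + 1) ^ t.length := by
          exact Nat.mul_le_mul_right _ (pvClos_length_le limit p xs)
      _ = xs.length * ((limit.toNat + 1) ^ t.length * (limit.toNat + 1)) := by ring

theorem pvFold_length_ge {limit : Int} : ∀ (ps : List Int) (xs : List Int), (∀ p ∈ ps, 2 ≤ p) →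
    (∀ x ∈ xs, 1 ≤ x ∧ x ≤ limit) →
    xs.length ≤ (ps.foldl (fun a q => pvClos limit q a) xs).length := by
  intro ps
  induction ps with
  | nil => simp
  | cons p t ih =>
    intro xs hp hx
    simp only [List.foldl_cons]
    have h2 := hp p (by simp)
    calc xs.length ≤ (pvClos limit p xs).length := pvClos_length_ge h2 xs hx
      _ ≤ _ := ih _ (fun q hq => hp q (by simp [hq])) (pvClos_mem h2 hx)

theorem pvFold_perm {limit : Int} : ∀ (ps : List Int) {xs ys : List Int}, xs.Perm ys →
    (ps.foldl (fun a q => pvClos limit q a) xs).Perm (ps.foldl (fun a q => pvClos limit q a) ys) := by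
  intro ps
  induction ps with
  | nil => intro xs ys h; simpa using h
  | cons p t ih =>
    intro xs ys h
    simp only [List.foldl_cons]
    exact ih (pvClos_perm limit p h)

-- the main loop invariant
theorem sorted_dropWhile_gt {n : Int} :
    ∀ (l : List Int), l.Pairwise (· ≤ ·) → ∀ b ∈ l.dropWhile (fun a => decide (a ≤ n)), n < b := by
  intro l
  induction l with
  | nil => simp
  | cons a t ih =>
    intro hpw b hb
    by_cases ha : a ≤ n
    · rw [List.dropWhile_cons_of_pos (by simpa using ha)] at hb
      exact ih (List.Pairwise.of_cons hpw) b hb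
    · rw [List.dropWhile_cons_of_neg (by simpa using ha)] at hb
      rcases List.mem_cons.mp hb with h | h
      · omega
      · have := (List.pairwise_cons.mp hpw).1 b h
        omega

theorem pvT_nil {primesL : List Int} {limit : Int} {res : List Int} {ind rind : Nat}
    (h : primesL.drop ind = []) : pvT primesL limit res ind rind = res := by
  unfold pvT; rw [h]

theorem pvT_cons {primesL : List Int} {limit : Int} {res : List Int} {ind rind : Nat}
    {p : Int} {ps : List Int} (h : primesL.drop ind = p :: ps) :
    pvT primesL limit res ind rind =
      ps.foldl (fun a q => pvClos limit q a) (res.take rind ++ pvClos limit p (res.drop rind)) := by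
  unfold pvT; rw [h]

theorem pvLoopA_perm {primesL : List Int} {limit : Int} (hp : ∀ p ∈ primesL, 2 ≤ p) :
    ∀ (fuel : Nat) (res : List Int) (ind rind : Nat),
      res.Pairwise (· ≤ ·) → (∀ x ∈ res, 1 ≤ x ∧ x ≤ limit) → rind < res.length →
      (pvT primesL limit res ind rind).length + primesL.length ≤ fuel + res.length + ind →
      (pvLoopA primesL limit fuel res ind rind).Perm (pvT primesL limit res ind rind) := by
  intro fuel
  induction fuel with
  | zero =>
    intro res ind rind hsort hmem hrind hfuel
    simp only [pvLoopA]
    cases hdrop : primesL.drop ind with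
    | nil => rw [pvT_nil hdrop]
    | cons p ps =>
      exfalso
      have hlen : primesL.length - ind = (p :: ps).length := by rw [← hdrop, List.length_drop]
      have hindlt : ind < primesL.length := by simp at hlen; omega
      have hsub : ∀ q ∈ p :: ps, 2 ≤ q := by
        intro q hq; exact hp q (List.mem_of_mem_drop (hdrop ▸ hq))
      have hmemdrop : ∀ x ∈ res.drop rind, 1 ≤ x ∧ x ≤ limit :=
        fun x hx => hmem x (List.mem_of_mem_drop hx)
      have h1 : (res.drop rind).length ≤ (pvClos limit p (res.drop rind)).length :=
        pvClos_length_ge (hsub p (by simp)) _ hmemdrop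
      have h2 := pvFold_length_ge ps (res.take rind ++ pvClos limit p (res.drop rind))
        (fun q hq => hsub q (by simp [hq]))
        (by
          intro x hx
          rcases List.mem_append.mp hx with h | h
          · exact hmem x (List.mem_of_mem_take h)
          · exact pvClos_mem (hsub p (by simp)) hmemdrop x h)
      have h3 : (res.take rind).length + (res.drop rind).length = res.length := by
        simp [List.length_take, List.length_drop]; omega
      rw [pvT_cons hdrop] at hfuel
      simp only [List.length_append] at h2
      simp only [List.length_cons] at hlen
      omega
  | succ f ih =>
    intro res ind rind hsort hmem hrind hfuel
    by_cases hind : ind < primesL.length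
    · have hdrop : primesL.drop ind = primesL[ind] :: primesL.drop (ind + 1) :=
        List.drop_eq_getElem_cons hind
      have hp2 : 2 ≤ primesL[ind] := hp _ (List.getElem_mem hind)
      have hgetp : primesL.getD ind 0 = primesL[ind] := List.getD_eq_getElem primesL 0 hind
      have hgetx : res.getD rind 0 = res[rind] := List.getD_eq_getElem res 0 hrind
      have hx := hmem res[rind] (List.getElem_mem hrind)
      set p := primesL[ind] with hpdef
      set x := res[rind] with hxdef
      have hdropr : res.drop rind = x :: res.drop (rind + 1) := List.drop_eq_getElem_cons hrind
      have htaker : res.take (rind + 1) = res.take rind ++ [x] := List.take_succ_eq_append_getElem hrind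
      have hxn : x < x * p := by nlinarith [hx.1]
      simp only [pvLoopA, if_pos hind, hgetp, hgetx]
      by_cases hn : x * p ≤ limit
      · rw [if_pos hn]
        set n := x * p with hndef
        set d1 := res.take (rind + 1) with hd1
        set rest := res.drop (rind + 1) with hrest
        set l := rest.takeWhile (fun a => decide (a ≤ n)) with hl
        set r := rest.dropWhile (fun a => decide (a ≤ n)) with hr
        have hlr : l ++ r = rest := List.takeWhile_append_dropWhile
        have hresdec : res = d1 ++ rest := (List.take_append_drop _ _).symm
        have hressplit : res = res.take rind ++ (x :: rest) := by
          rw [← hdropr]; exact (List.take_append_drop _ _).symm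
        set ys := (d1 ++ l) ++ n :: r with hys
        have hysperm : ys.Perm (res ++ [n]) := by
          have h1 : ys.Perm (n :: ((d1 ++ l) ++ r)) := List.perm_middle
          have h2 : (d1 ++ l) ++ r = res := by rw [List.append_assoc, hlr, ← hresdec]
          rw [h2] at h1
          exact h1.trans (List.perm_append_singleton n res).symm
        have hrestsort : rest.Pairwise (· ≤ ·) := hsort.sublist (List.drop_sublist _ _)
        have hd1le : ∀ a ∈ d1, a ≤ n := by
          intro a ha
          rcases List.mem_append.mp (htaker ▸ ha) with h | h
          · have hpa := List.pairwise_append.mp (hressplit ▸ hsort)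
            have := hpa.2.2 a h x (by simp)
            omega
          · simp at h; omega
        have hlle : ∀ a ∈ l, a ≤ n := by
          intro a ha
          have := List.mem_takeWhile_imp ha
          simpa using this
        have hrge : ∀ b ∈ r, n < b := fun b hb => sorted_dropWhile_gt rest hrestsort b hb
        have hysp : ys.Pairwise (· ≤ ·) := by
          have hsres : ((d1 ++ l) ++ r).Pairwise (· ≤ ·) := by
            rw [List.append_assoc, hlr, ← hresdec]; exact hsort
          have h1 := List.pairwise_append.mp hsres
          rw [hys, List.pairwise_append]
          refine ⟨h1.1, ?_, ?_⟩
          · rw [List.pairwise_cons]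
            exact ⟨fun b hb => le_of_lt (hrge b hb), h1.2.1⟩
          · intro a ha b hb
            rcases List.mem_cons.mp hb with hbn | hbr
            · subst hbn
              rcases List.mem_append.mp ha with h | h
              · exact hd1le a h
              · exact hlle a h
            · exact h1.2.2 a ha b hbr
        have hsorted_eq : PySem.List.sorted (res ++ [n]) (fun x => x) false = ys :=
          PySem.List.sorted_id_eq_of_perm_of_pairwise (res ++ [n]) ys hysperm hysp
        have hyslen : ys.length = res.length + 1 := by
          have := hysperm.length_eq; simpa using this
        have hysmem : ∀ z ∈ ys, 1 ≤ z ∧ z ≤ limit := by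
          intro z hz
          have := hysperm.mem_iff.mp hz
          rcases List.mem_append.mp this with h | h
          · exact hmem z h
          · simp at h; subst h; exact ⟨by nlinarith [hx.1], hn⟩
        have hd1len : d1.length = rind + 1 := List.length_take_of_le (by omega)
        have hys_take : ys.take (rind + 1) = d1 := by
          rw [hys, List.take_append_of_le_length (by simp only [List.length_append, hd1len]; omega),
              List.take_append_of_le_length (by omega), List.take_of_length_le (by omega)]
        have hys_drop : ys.drop (rind + 1) = l ++ n :: r := by
          rw [hys, List.drop_append_of_le_length (by simp only [List.length_append, hd1len]; omega),
              List.drop_append_of_le_length (by omega), List.drop_eq_nil_of_le (by omega)]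
          simp
        have hchainx : pvChain p limit (limit.toNat + 1) x = x :: pvChain p limit (limit.toNat + 1) n :=
          pvChain_canon_cons hp2 hx.1 hx.2
        have hargperm : (d1 ++ pvClos limit p (l ++ n :: r)).Perm
            (res.take rind ++ pvClos limit p (res.drop rind)) := by
          have hcl : (pvClos limit p (l ++ n :: r)).Perm (pvClos limit p (n :: rest)) := by
            apply pvClos_perm
            have : (l ++ n :: r).Perm (n :: (l ++ r)) := List.perm_middle
            rw [hlr] at this; exact this
          have hclos_cons : pvClos limit p (n :: rest) =
              pvChain p limit (limit.toNat + 1) n ++ pvClos limit p rest := by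
            simp [pvClos]
          have hrhs : res.take rind ++ pvClos limit p (res.drop rind) =
              (res.take rind ++ [x]) ++ (pvChain p limit (limit.toNat + 1) n ++ pvClos limit p rest) := by
            rw [hdropr]
            simp only [pvClos, List.flatMap_cons]
            rw [← pvClos, hchainx]
            simp
          rw [hrhs, htaker]
          exact ((hcl.trans (by rw [hclos_cons])).append_left _)
        have hTperm : (pvT primesL limit ys ind (rind + 1)).Perm (pvT primesL limit res ind rind) := by
          rw [pvT_cons hdrop, pvT_cons hdrop, hys_take, hys_drop]
          exact pvFold_perm _ hargperm
        have hfuel' : (pvT primesL limit ys ind (rind + 1)).length + primesL.length ≤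
            f + ys.length + ind := by
          have := hTperm.length_eq
          omega
        rw [hsorted_eq]
        exact (ih ys ind (rind + 1) hysp hysmem (by omega) hfuel').trans hTperm
      · rw [if_neg hn]
        have hbig : ∀ y ∈ res.drop rind, 1 ≤ y ∧ y ≤ limit ∧ limit < y * p := by
          intro y hy
          have hmy := hmem y (List.mem_of_mem_drop hy)
          have hxy : x ≤ y := by
            rw [hdropr] at hy
            rcases List.mem_cons.mp hy with h | h
            · omega
            · have hpair : (x :: res.drop (rind + 1)).Pairwise (· ≤ ·) := by
                rw [← hdropr]; exact hsort.sublist (List.drop_sublist _ _)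
              exact (List.pairwise_cons.mp hpair).1 y h
          refine ⟨hmy.1, hmy.2, ?_⟩
          have : x * p ≤ y * p := by nlinarith
          omega
        have hclos : pvClos limit p (res.drop rind) = res.drop rind := pvClos_eq_self hp2 hbig
        have hTeq : pvT primesL limit res ind rind = pvT primesL limit res (ind + 1) 0 := by
          rw [pvT_cons hdrop, hclos, List.take_append_drop]
          cases hdrop2 : primesL.drop (ind + 1) with
          | nil => rw [pvT_nil hdrop2]; simp
          | cons q qs => rw [pvT_cons hdrop2]; simp
        rw [hTeq]
        exact ih res (ind + 1) 0 hsort hmem (by omega) (by rw [← hTeq]; omega)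
    · simp only [pvLoopA, if_neg hind]
      rw [pvT_nil (List.drop_eq_nil_of_le (by omega))]

theorem pvProd_pos {primesL : List Int} (hp : ∀ p ∈ primesL, 2 ≤ p) :
    1 ≤ primesL.foldl (fun a i => a * i) 1 := by
  have gen : ∀ (l : List Int) (a : Int), (∀ q ∈ l, 2 ≤ q) → 1 ≤ a → 1 ≤ l.foldl (fun x i => x * i) a := by
    intro l
    induction l with
    | nil => intro a _ ha; simpa using ha
    | cons q t ih =>
      intro a h ha
      simp only [List.foldl_cons]
      exact ih (a * q) (fun r hr => h r (by simp [hr])) (by nlinarith [h q (by simp)])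
  exact gen primesL 1 hp le_rfl

theorem pvMax_getD_eq_of_perm {xs ys : List Int} (h : xs.Perm ys) :
    (PySem.List.max? xs (fun x => x)).getD 0 = (PySem.List.max? ys (fun x => x)).getD 0 := by
  cases hxs : PySem.List.max? xs (fun x => x) with
  | none =>
    have hx : xs = [] := (PySem.List.max?_eq_none_iff _ _).mp hxs
    have hy : ys = [] := by rw [hx] at h; exact h.symm.eq_nil
    rw [(PySem.List.max?_eq_none_iff _ _).mpr hy]
  | some m =>
    cases hys : PySem.List.max? ys (fun x => x) with
    | none =>
      have hy : ys = [] := (PySem.List.max?_eq_none_iff _ _).mp hys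
      have hx : xs = [] := by rw [hy] at h; exact h.eq_nil
      rw [hx] at hxs
      rw [(PySem.List.max?_eq_none_iff ([] : List Int) (fun x => x)).mpr rfl] at hxs
      cases hxs
    | some m' =>
      have hm := PySem.List.max?_mem hxs
      have hm' := PySem.List.max?_mem hys
      have h1 := PySem.List.max?_isMax hxs
      have h2 := PySem.List.max?_isMax hys
      simp only [Option.getD_some]
      exact le_antisymm (h2 m (h.subset hm)) (h1 m' (h.symm.subset hm'))

-- ===== VERDICT (by name: the statement is the Claim_ definition above) =====
theorem count_find_num_spec : Claim_equal_count_find_num := by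
  unfold Claim_equal_count_find_num
  intro primesL limit _hdom hpre
  unfold Spec_count_find_num count_find_num count_find_num_alt
  by_cases hfl : primesL.foldl (fun a i => a * i) 1 ≤ limit
  · rw [if_pos hfl, if_neg (not_lt.mpr hfl)]
    have hp : ∀ p ∈ primesL, 2 ≤ p := by
      rcases hpre with h | h
      · exact h
      · exact absurd hfl (not_le.mpr h)
    have hfirst : 1 ≤ primesL.foldl (fun a i => a * i) 1 := pvProd_pos hp
    have hT0 : pvT primesL limit [primesL.foldl (fun a i => a * i) 1] 0 0 =
        primesL.foldl (fun vals p => pvClos limit p vals) [primesL.foldl (fun a i => a * i) 1] := by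
      cases primesL with
      | nil => rw [pvT_nil rfl]; rfl
      | cons q qs =>
        rw [pvT_cons rfl]
        simp [List.foldl_cons]
    have hTlen : (pvT primesL limit [primesL.foldl (fun a i => a * i) 1] 0 0).length ≤
        (limit.toNat + 1) ^ primesL.length := by
      rw [hT0]
      have := pvFold_length_le (limit := limit) primesL [primesL.foldl (fun a i => a * i) 1]
      simpa using this
    have hperm := pvLoopA_perm hp ((limit.toNat + 1) ^ primesL.length + primesL.length + 1)
      [primesL.foldl (fun a i => a * i) 1] 0 0 (List.pairwise_singleton _ _)
      (by intro x hx; simp at hx; subst hx; exact ⟨hfirst, hfl⟩)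
      (by simp)
      (by simp only [List.length_singleton]; omega)
    rw [hT0] at hperm
    have hlen : PySem.List.len (pvLoopA primesL limit ((limit.toNat + 1) ^ primesL.length + primesL.length + 1)
          [primesL.foldl (fun a i => a * i) 1] 0 0) =
        PySem.List.len (primesL.foldl (fun vals p => pvClos limit p vals)
          [primesL.foldl (fun a i => a * i) 1]) := by
      simp only [PySem.List.len_eq, hperm.length_eq]
    have hmax := pvMax_getD_eq_of_perm hperm
    simp only [hlen, hmax]
  · rw [if_neg hfl, if_pos (not_le.mp hfl)]
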